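-- pv_equiv track=rewrite | github.com/Code-Machine333/Scraping | src/cricket_database/utils/migrate_sql.py | split_sql_batches
-- ===== SOURCE A (Python) =====
-- from typing import Iterable, List, Tuple
--
-- def split_sql_batches(sql_text: str) -> Iterable[str]:
--     """Yield executable SQL batches.
--
--     - Keeps DELIMITER blocks intact by not splitting on semicolons inside them.
--     - For typical schema files without custom delimiters, splits on semicolons.
--     """
--     # Simple heuristic: if we see DELIMITER, execute whole text as one batch
--     upper = sql_text.upper()
--     if "\nDELIMITER " in upper or upper.startswith("DELIMITER "):
--         yield sql_text
--         return
--
--     buffer: List[str] = []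
--     for line in sql_text.splitlines(keepends=True):
--         buffer.append(line)
--         if line.strip().endswith(";"):
--             batch = "".join(buffer).strip()
--             if batch:
--                 yield batch
--             buffer.clear()
--     # trailing batch
--     tail = "".join(buffer).strip()
--     if tail:
--         yield tail
-- ===== SOURCE B (Python) =====
-- def split_sql_batches(sql_text: str):
--     """Yield executable SQL batches (block-at-a-time re-implementation)."""
--     upper = sql_text.upper()
--     if "\nDELIMITER " in upper or upper.startswith("DELIMITER "):
--         yield sql_text
--         return
--
--     lines = sql_text.splitlines(keepends=True)
--     while lines:
--         cut = next((i + 1 for i, ln in enumerate(lines) if ln.strip().endswith(";")),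
--                    len(lines))
--         batch = "".join(lines[:cut]).strip()
--         if batch:
--             yield batch
--         lines = lines[cut:]
-- ===== Notes on version B (the rewrite author's own statement) =====
-- stated objective: alternative
-- what changed: Replaces A's line-by-line loop with a running buffer (append each line, flush when a stripped line ends with a semicolon, flush the tail) by a block-at-a-time scan: find the index just past the next semicolon-terminated line (or end of input), join-and-strip that whole slice, emit it if nonempty, and continue on the remaining lines; the DELIMITER short-circuit is kept.
import Mathlib
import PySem

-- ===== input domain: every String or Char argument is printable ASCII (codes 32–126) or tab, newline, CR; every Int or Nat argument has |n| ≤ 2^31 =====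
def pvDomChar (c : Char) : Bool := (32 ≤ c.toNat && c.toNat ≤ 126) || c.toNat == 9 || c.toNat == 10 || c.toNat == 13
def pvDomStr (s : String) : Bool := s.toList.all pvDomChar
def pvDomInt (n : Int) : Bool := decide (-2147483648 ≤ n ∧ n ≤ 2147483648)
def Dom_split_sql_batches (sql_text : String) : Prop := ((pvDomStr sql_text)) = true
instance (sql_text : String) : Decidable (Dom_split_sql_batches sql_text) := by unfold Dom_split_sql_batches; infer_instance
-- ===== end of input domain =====

-- B replaces A's running line-buffer with a block-at-a-time scan (find the next
-- terminating line, slice the whole block, recurse); same values, alternative decomposition.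

-- shared helper: s.splitlines(keepends=True), hand-ported (exact on the stated domain,
-- whose only line boundaries are '\n', '\r\n', '\r'; a trailing run without newline is kept)
def pvSplitKeep (buf : List Char) : List Char → List (List Char)
  | [] => if buf = [] then [] else [buf.reverse]
  | '\r' :: '\n' :: r => (buf.reverse ++ ['\r', '\n']) :: pvSplitKeep [] r
  | c :: r =>
    if c = '\n' ∨ c = '\r' then (buf.reverse ++ [c]) :: pvSplitKeep [] r
    else pvSplitKeep (c :: buf) r
termination_by l => l.length
decreasing_by all_goals simp

-- line.strip().endswith(";")
def pvBoundary (l : List Char) : Bool := PySem.Chars.endswith (PySem.Chars.strip l) [';']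

-- ===== PORT A =====
-- A's loop state: (batches yielded so far, buffer)
def pvStepA (st : List (List Char) × List (List Char)) (line : List Char) :
    List (List Char) × List (List Char) :=
  let buffer := st.2 ++ [line]
  if pvBoundary line then
    let batch := PySem.Chars.strip (PySem.Chars.join [] buffer)
    (if batch = [] then st.1 else st.1 ++ [batch], [])
  else (st.1, buffer)

def split_sql_batches (sql_text : String) : List String :=
  let upper := PySem.Str.upper sql_text
  if PySem.Str.isIn "\nDELIMITER " upper || PySem.Str.startswith upper "DELIMITER " then
    [sql_text]
  else
    let st := (pvSplitKeep [] sql_text.toList).foldl pvStepA ([], [])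
    let tail := PySem.Chars.strip (PySem.Chars.join [] st.2)
    (if tail = [] then st.1 else st.1 ++ [tail]).map String.mk

-- ===== PORT B =====
-- next((i + 1 for i, ln in enumerate(lines) if ln.strip().endswith(";")), len(lines))
def pvCut (lines : List (List Char)) : Nat :=
  match lines.findIdx? pvBoundary with
  | some i => i + 1
  | none => lines.length

theorem pvCut_pos (l : List Char) (ls : List (List Char)) : 1 ≤ pvCut (l :: ls) := by
  unfold pvCut
  cases h : (l :: ls).findIdx? pvBoundary <;> simp

-- block-at-a-time: cut past the first terminating line (or end of list),
-- emit the stripped block, continue on the remaining lines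
def pvSegsB : List (List Char) → List (List Char)
  | [] => []
  | l :: ls =>
    let cut := pvCut (l :: ls)
    let batch := PySem.Chars.strip (PySem.Chars.join [] ((l :: ls).take cut))
    (if batch = [] then [] else [batch]) ++ pvSegsB ((l :: ls).drop cut)
termination_by lines => lines.length
decreasing_by
  simp only [List.length_drop]
  have := pvCut_pos l ls
  simp only [List.length_cons]
  omega

def split_sql_batches_alt (sql_text : String) : List String :=
  let upper := PySem.Str.upper sql_text
  if PySem.Str.isIn "\nDELIMITER " upper || PySem.Str.startswith upper "DELIMITER " then
    [sql_text]
  else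
    (pvSegsB (pvSplitKeep [] sql_text.toList)).map String.mk

-- ===== PRECONDITION & SPEC =====
def Spec_split_sql_batches (sql_text : String) (out : List String) : Prop := out = split_sql_batches_alt sql_text
instance (sql_text : String) (out : List String) : Decidable (Spec_split_sql_batches sql_text out) := by unfold Spec_split_sql_batches; infer_instance

-- ===== CLAIM (what is proved, stated in full; the proofs are below) =====
def Claim_equal_split_sql_batches : Prop := ∀ (sql_text : String), Dom_split_sql_batches sql_text → Spec_split_sql_batches sql_text (split_sql_batches sql_text)

-- ===== LEMMAS AND PROOFS =====

-- A's finalizer: flush the trailing buffer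
def pvFinA (st : List (List Char) × List (List Char)) : List (List Char) :=
  let tail := PySem.Chars.strip (PySem.Chars.join [] st.2)
  if tail = [] then st.1 else st.1 ++ [tail]

-- already-yielded batches only accumulate in front of the fold's output
theorem pvFoldA_out (lines : List (List Char)) (out buf : List (List Char)) :
    lines.foldl pvStepA (out, buf) =
      (out ++ (lines.foldl pvStepA ([], buf)).1, (lines.foldl pvStepA ([], buf)).2) := by
  induction lines generalizing out buf with
  | nil => simp
  | cons l ls ih =>
    simp only [List.foldl_cons]
    have h1 : pvStepA (out, buf) l = (out ++ (pvStepA ([], buf) l).1, (pvStepA ([], buf) l).2) := by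
      simp only [pvStepA]
      split_ifs <;> simp
    rw [h1, ih (out ++ (pvStepA ([], buf) l).1) (pvStepA ([], buf) l).2,
        ih (pvStepA ([], buf) l).1 (pvStepA ([], buf) l).2]
    simp

theorem pvFindIdx?_clean_boundary (buf : List (List Char)) (l : List Char)
    (ls : List (List Char)) (hbuf : ∀ x ∈ buf, pvBoundary x = false)
    (hl : pvBoundary l = true) :
    (buf ++ l :: ls).findIdx? pvBoundary = some buf.length := by
  induction buf with
  | nil => simp [List.findIdx?_cons, hl]
  | cons b bs ih =>
    have hb : pvBoundary b = false := hbuf b (by simp)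
    simp only [List.cons_append, List.findIdx?_cons, hb]
    rw [ih (fun x hx => hbuf x (by simp [hx]))]
    simp

theorem pvFindIdx?_clean (buf : List (List Char))
    (hbuf : ∀ x ∈ buf, pvBoundary x = false) :
    buf.findIdx? pvBoundary = none := by
  induction buf with
  | nil => simp
  | cons b bs ih =>
    have hb : pvBoundary b = false := hbuf b (by simp)
    simp only [List.findIdx?_cons, hb]
    rw [ih (fun x hx => hbuf x (by simp [hx]))]
    simp

theorem pvSegsB_ne (lines : List (List Char)) (h : lines ≠ []) :
    pvSegsB lines =
      (if PySem.Chars.strip (PySem.Chars.join [] (lines.take (pvCut lines))) = [] then []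
       else [PySem.Chars.strip (PySem.Chars.join [] (lines.take (pvCut lines)))]) ++
        pvSegsB (lines.drop (pvCut lines)) := by
  cases lines with
  | nil => exact absurd rfl h
  | cons l ls => rw [pvSegsB]

-- main invariant: A's fold from a clean buffer computes B's block recursion
theorem pvMain (lines : List (List Char)) :
    ∀ buf, (∀ x ∈ buf, pvBoundary x = false) →
      pvFinA (lines.foldl pvStepA ([], buf)) = pvSegsB (buf ++ lines) := by
  induction lines with
  | nil =>
    intro buf hbuf
    simp only [List.foldl_nil, List.append_nil]
    cases buf with
    | nil =>
      simp [pvFinA, pvSegsB, PySem.Chars.join, PySem.Chars.strip, PySem.Chars.lstrip,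
        PySem.Chars.rstrip]
      intro x hx
      simp [List.intercalate] at hx
    | cons b bs =>
      rw [pvSegsB_ne (b :: bs) (by simp)]
      have hc : pvCut (b :: bs) = (b :: bs).length := by
        unfold pvCut
        rw [pvFindIdx?_clean (b :: bs) hbuf]
      rw [hc]
      simp [pvFinA, pvSegsB]
  | cons l ls ih =>
    intro buf hbuf
    simp only [List.foldl_cons]
    by_cases hb : pvBoundary l = true
    · have hstep : pvStepA ([], buf) l =
        ((if PySem.Chars.strip (PySem.Chars.join [] (buf ++ [l])) = [] then []
          else [PySem.Chars.strip (PySem.Chars.join [] (buf ++ [l]))]), []) := by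
        simp [pvStepA, hb]
      rw [hstep, pvFoldA_out, pvSegsB_ne (buf ++ l :: ls) (by simp)]
      have hc : pvCut (buf ++ l :: ls) = buf.length + 1 := by
        unfold pvCut
        rw [pvFindIdx?_clean_boundary buf l ls hbuf hb]
      rw [hc]
      have htake : (buf ++ l :: ls).take (buf.length + 1) = buf ++ [l] := by
        rw [show buf ++ l :: ls = (buf ++ [l]) ++ ls by simp,
            List.take_append_of_le_length (by simp)]
        simp
      have hdrop : (buf ++ l :: ls).drop (buf.length + 1) = ls := by
        rw [show buf ++ l :: ls = (buf ++ [l]) ++ ls by simp,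
            List.drop_append_of_le_length (by simp)]
        simp
      rw [htake, hdrop]
      have hih := ih [] (by simp)
      simp only [List.nil_append] at hih
      rw [← hih]
      simp only [pvFinA]
      split_ifs <;> simp_all
    · have hstep : pvStepA ([], buf) l = ([], buf ++ [l]) := by
        simp [pvStepA, hb]
      rw [hstep, ih (buf ++ [l])
            (by intro x hx
                rcases List.mem_append.1 hx with h | h
                · exact hbuf x h
                · simp at h
                  subst h
                  simpa using hb)]
      simp

-- ===== VERDICT (by name: the statement is the Claim_ definition above) =====
theorem split_sql_batches_spec : Claim_equal_split_sql_batches := by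
  intro s _
  unfold Spec_split_sql_batches split_sql_batches split_sql_batches_alt
  by_cases hc : (PySem.Str.isIn "\nDELIMITER " (PySem.Str.upper s)
      || PySem.Str.startswith (PySem.Str.upper s) "DELIMITER ") = true
  · simp at hc
    simp [hc]
  · simp only [hc, if_false, Bool.false_eq_true]
    have h := pvMain (pvSplitKeep [] s.toList) [] (by simp)
    simp only [List.nil_append, pvFinA] at h
    rw [h]
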